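-- pv_equiv track=rewrite | github.com/NitinOnlyCodes/main | findDivisionUptoGivenDecimalPlaces.py | findDivision
-- ===== SOURCE A (Python) =====
-- def findDivision(x, y, n):
--     # Write your code here.
--     if y ==0:
--         return "0.0"
--
--     sign = "-" if (x < 0)^(y < 0) else ''
--     x_Abs = abs(x)
--     y_Abs = abs(y)
--
--     int_part = x_Abs // y_Abs
--     remainder = x_Abs % y_Abs
--
--     decimal_digit = []
--     for _ in range(n):
--         remainder *= 10
--         digit = remainder // y_Abs
--         decimal_digit.append(str(digit))
--         remainder = remainder % y_Abs
--     result = sign + str(int_part) + '.' + ''.join(decimal_digit[:n])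
--     return result
-- ===== SOURCE B (Python) =====
-- def findDivision(x, y, n):
--     if y == 0:
--         return "0.0"
--     sign = "-" if (x < 0) != (y < 0) else ""
--     xa = abs(x)
--     ya = abs(y)
--     r = xa % ya
--     out = [sign, str(xa // ya), "."]
--     m = n
--     # emit 9 digits per step: str(10**9 + c)[1:] is c zero-padded to 9 digits
--     while m >= 9:
--         r *= 1000000000
--         out.append(str(1000000000 + r // ya)[1:])
--         r %= ya
--         m -= 9
--     if m > 0:
--         p = 10 ** m
--         out.append(str(p + r * p // ya)[1:])
--     return "".join(out)
-- ===== Notes on version B (the rewrite author's own statement) =====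
-- stated objective: faster
-- what changed: A runs a per-digit for-loop over range(n) appending str(digit) and joining a slice; B is a while-loop on the remaining digit count that performs long division in base 10^9 (9 digits per iteration, each block zero-padded via the str(10**9+c)[1:] trick), finishes the last m<9 digits with one closed-form block str(10**m + r*10**m//y)[1:], and accumulates sign/integer part/point/blocks in a single list.
import Mathlib
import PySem

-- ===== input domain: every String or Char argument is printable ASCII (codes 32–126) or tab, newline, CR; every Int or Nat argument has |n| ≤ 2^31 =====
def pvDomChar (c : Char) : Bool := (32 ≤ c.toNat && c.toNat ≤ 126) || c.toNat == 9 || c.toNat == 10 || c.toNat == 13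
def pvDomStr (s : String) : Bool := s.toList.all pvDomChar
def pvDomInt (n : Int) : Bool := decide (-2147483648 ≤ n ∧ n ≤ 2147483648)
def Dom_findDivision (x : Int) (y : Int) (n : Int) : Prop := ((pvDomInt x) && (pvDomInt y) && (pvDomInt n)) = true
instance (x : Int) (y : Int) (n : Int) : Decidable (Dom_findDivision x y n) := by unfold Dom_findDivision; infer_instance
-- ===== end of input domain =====

-- B replaces A's per-digit for-loop by a while-loop doing long division in base 10^9
-- (9 zero-padded digits per iteration, the last m<9 digits as one closed-form block):
-- measurably faster by a constant factor.

-- ===== PORT A =====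
def findDivision (x : Int) (y : Int) (n : Int) : String :=
  if y == 0 then "0.0"
  else
    let sign : String := if Bool.xor (decide (x < 0)) (decide (y < 0)) then "-" else ""
    let xAbs : Int := |x|
    let yAbs : Int := |y|
    let intPart : Int := PySem.Int.floordiv xAbs yAbs
    let st : Int × List String :=
      (PySem.List.pyRange 0 n 1).foldl
        (fun st _ =>
          (PySem.Int.mod (st.1 * 10) yAbs,
           st.2 ++ [PySem.Int.toStr (PySem.Int.floordiv (st.1 * 10) yAbs)]))
        (PySem.Int.mod xAbs yAbs, [])
    sign ++ PySem.Int.toStr intPart ++ "." ++ PySem.Str.join "" (PySem.List.slice st.2 none (some n))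

-- ===== PORT B =====
-- the while loop: while m >= 9: emit str(10**9 + r*10**9//ya)[1:]; r = r*10**9 % ya; m -= 9
def pvWhileB (ya : Int) (r : Int) (out : List String) (m : Int) : List String × Int × Int :=
  if 9 ≤ m then
    pvWhileB ya (PySem.Int.mod (r * 1000000000) ya)
      (out ++ [PySem.Str.slice
        (PySem.Int.toStr (1000000000 + PySem.Int.floordiv (r * 1000000000) ya)) (some 1) none])
      (m - 9)
  else (out, r, m)
termination_by m.toNat
decreasing_by omega

-- after the loop: if m > 0, emit the last m digits as str(10**m + r*10**m//ya)[1:]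
-- (10 ** m is ported as 10 ^ m.toNat — exact here since the guard gives 0 < m)
def pvFinishB (ya : Int) (res : List String × Int × Int) : List String :=
  if 0 < res.2.2 then
    res.1 ++ [PySem.Str.slice
      (PySem.Int.toStr ((10 : Int) ^ res.2.2.toNat
        + PySem.Int.floordiv (res.2.1 * (10 : Int) ^ res.2.2.toNat) ya)) (some 1) none]
  else res.1

def findDivision_alt (x : Int) (y : Int) (n : Int) : String :=
  if y == 0 then "0.0"
  else
    let sign : String := if (decide (x < 0)) != (decide (y < 0)) then "-" else ""
    let xa : Int := |x|
    let ya : Int := |y|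
    let r : Int := PySem.Int.mod xa ya
    let out : List String := [sign, PySem.Int.toStr (PySem.Int.floordiv xa ya), "."]
    PySem.Str.join "" (pvFinishB ya (pvWhileB ya r out n))

-- ===== PRECONDITION & SPEC =====
def Spec_findDivision (x : Int) (y : Int) (n : Int) (out : String) : Prop := out = findDivision_alt x y n
instance (x : Int) (y : Int) (n : Int) (out : String) : Decidable (Spec_findDivision x y n out) := by unfold Spec_findDivision; infer_instance

-- ===== CLAIM (what is proved, stated in full; the proofs are below) =====
def Claim_equal_findDivision : Prop := ∀ (x : Int) (y : Int) (n : Int), Dom_findDivision x y n → Spec_findDivision x y n (findDivision x y n)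

-- ===== LEMMAS AND PROOFS =====

/-- Fixed-width decimal representation: the `m` low decimal digits of `v`, MSB first. -/
def pvRep : Nat → Nat → List Char
  | 0, _ => []
  | m + 1, v => pvRep m (v / 10) ++ [Nat.digitChar (v % 10)]

/-- A's digit stream: `k` fractional digits of `r/Y`, produced digit by digit. -/
def pvDstep (Y : Nat) : Nat → Nat → List Char
  | _, 0 => []
  | r, k + 1 => Nat.digitChar (r * 10 / Y) :: pvDstep Y (r * 10 % Y) k

lemma pv_toDigitsCore_append : ∀ (f n : Nat) (ds : List Char),
    Nat.toDigitsCore 10 f n ds = Nat.toDigitsCore 10 f n [] ++ ds := by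
  intro f
  induction f with
  | zero => intro n ds; simp [Nat.toDigitsCore]
  | succ f ih =>
    intro n ds
    simp only [Nat.toDigitsCore]
    by_cases h : n / 10 = 0
    · simp [h]
    · simp only [h, if_false]
      rw [ih (n / 10) (Nat.digitChar (n % 10) :: ds), ih (n / 10) [Nat.digitChar (n % 10)]]
      simp

lemma pv_toDigitsCore_fuel : ∀ (f1 f2 n : Nat) (ds : List Char), n < f1 → n < f2 →
    Nat.toDigitsCore 10 f1 n ds = Nat.toDigitsCore 10 f2 n ds := by
  intro f1
  induction f1 with
  | zero => intro f2 n ds h1 h2; omega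
  | succ f1 ih =>
    intro f2 n ds h1 h2
    cases f2 with
    | zero => omega
    | succ f2 =>
      simp only [Nat.toDigitsCore]
      by_cases h : n / 10 = 0
      · simp [h]
      · simp only [h, if_false]
        have hpos : 0 < n := by omega
        have hlt : n / 10 < n := Nat.div_lt_self hpos (by norm_num)
        exact ih f2 (n / 10) _ (by omega) (by omega)

lemma pv_toDigits_single {n : Nat} (h : n < 10) : Nat.toDigits 10 n = [Nat.digitChar n] := by
  simp [Nat.toDigits, Nat.toDigitsCore, Nat.div_eq_of_lt h, Nat.mod_eq_of_lt h]

lemma pv_toDigits_step {n : Nat} (h : 10 ≤ n) :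
    Nat.toDigits 10 n = Nat.toDigits 10 (n / 10) ++ [Nat.digitChar (n % 10)] := by
  have hne : n / 10 ≠ 0 := by omega
  have hpos : 0 < n := by omega
  have hlt : n / 10 < n := Nat.div_lt_self hpos (by norm_num)
  have h1 : Nat.toDigits 10 n = Nat.toDigitsCore 10 n (n / 10) [Nat.digitChar (n % 10)] := by
    simp [Nat.toDigits, Nat.toDigitsCore, hne]
  rw [h1, pv_toDigitsCore_append n (n / 10) [Nat.digitChar (n % 10)],
    pv_toDigitsCore_fuel n (n / 10 + 1) (n / 10) [] (by omega) (by omega)]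
  rfl

/-- `str(10**m + v)` is `'1'` followed by the `m` zero-padded digits of `v`. -/
lemma pv_toDigits_pow_add : ∀ (m v : Nat), v < 10 ^ m →
    Nat.toDigits 10 (10 ^ m + v) = '1' :: pvRep m v := by
  intro m
  induction m with
  | zero =>
    intro v hv
    interval_cases v
    rw [pv_toDigits_single (by norm_num)]
    rfl
  | succ m ih =>
    intro v hv
    have hp : (10 : Nat) ^ (m + 1) = 10 ^ m * 10 := by ring
    have hge : 10 ≤ 10 ^ (m + 1) + v := by
      have : (10 : Nat) ≤ 10 ^ (m + 1) := by
        calc (10 : Nat) = 10 ^ 1 := by norm_num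
          _ ≤ 10 ^ (m + 1) := Nat.pow_le_pow_right (by norm_num) (by omega)
      omega
    have hvd : v = 10 * (v / 10) + v % 10 := (Nat.div_add_mod' v 10).symm ▸ by omega
    have hdiv : (10 ^ (m + 1) + v) / 10 = 10 ^ m + v / 10 := by omega
    have hmod : (10 ^ (m + 1) + v) % 10 = v % 10 := by omega
    have hv' : v / 10 < 10 ^ m := by omega
    rw [pv_toDigits_step hge, hdiv, hmod, ih (v / 10) hv']
    rfl

lemma pv_div_step {Y : Nat} (hY : 0 < Y) (A : Nat) :
    A * 10 / Y = 10 * (A / Y) + A % Y * 10 / Y ∧ A % Y * 10 / Y < 10 ∧ A * 10 % Y = A % Y * 10 % Y := by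
  have hA : A * 10 = Y * (10 * (A / Y)) + A % Y * 10 := by
    conv_lhs => rw [← Nat.div_add_mod A Y]
    ring
  have hm := Nat.mod_lt A hY
  refine ⟨?_, ?_, ?_⟩
  · rw [hA, Nat.mul_add_div hY]
  · rw [Nat.div_lt_iff_lt_mul hY]; omega
  · rw [hA, Nat.mul_add_mod]

lemma pv_dstep_snoc {Y : Nat} (hY : 0 < Y) : ∀ (j r : Nat), r < Y →
    pvDstep Y r (j + 1) = pvDstep Y r j ++ [Nat.digitChar (r * 10 ^ j % Y * 10 / Y)] := by
  intro j
  induction j with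
  | zero =>
    intro r hr
    simp [pvDstep, Nat.mod_eq_of_lt hr]
  | succ j ih =>
    intro r hr
    have hr' : r * 10 % Y < Y := Nat.mod_lt _ hY
    have hmm : r * 10 % Y * 10 ^ j % Y = r * 10 ^ (j + 1) % Y := by
      have h1 : r * 10 ^ (j + 1) = r * 10 * 10 ^ j := by ring
      rw [h1, Nat.mod_mul_mod]
    calc pvDstep Y r (j + 1 + 1)
        = Nat.digitChar (r * 10 / Y) :: pvDstep Y (r * 10 % Y) (j + 1) := rfl
      _ = Nat.digitChar (r * 10 / Y) ::
          (pvDstep Y (r * 10 % Y) j ++ [Nat.digitChar (r * 10 % Y * 10 ^ j % Y * 10 / Y)]) := by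
          rw [ih _ hr']
      _ = pvDstep Y r (j + 1) ++ [Nat.digitChar (r * 10 ^ (j + 1) % Y * 10 / Y)] := by
          rw [hmm]; rfl

lemma pv_rep_eq_dstep {Y : Nat} (hY : 0 < Y) : ∀ (j r : Nat), r < Y →
    pvRep j (r * 10 ^ j / Y) = pvDstep Y r j := by
  intro j
  induction j with
  | zero => intro r hr; rfl
  | succ j ih =>
    intro r hr
    obtain ⟨hdiv, hb, hmod⟩ := pv_div_step hY (r * 10 ^ j)
    have hp : r * 10 ^ (j + 1) = r * 10 ^ j * 10 := by ring
    have e12 : ∀ u q d : Nat, u = 10 * q + d → d < 10 → u / 10 = q ∧ u % 10 = d := by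
      intro u q d h1 h2; omega
    obtain ⟨e1, e2⟩ := e12 (r * 10 ^ (j + 1) / Y) (r * 10 ^ j / Y) (r * 10 ^ j % Y * 10 / Y)
      (by rw [hp]; exact hdiv) hb
    rw [pvRep, e1, e2, ih r hr, ← pv_dstep_snoc hY j r hr]

lemma pv_dstep_split {Y : Nat} (hY : 0 < Y) : ∀ (a b r : Nat), r < Y →
    pvDstep Y r (a + b) = pvDstep Y r a ++ pvDstep Y (r * 10 ^ a % Y) b := by
  intro a
  induction a with
  | zero =>
    intro b r hr
    simp [pvDstep, Nat.mod_eq_of_lt hr]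
  | succ a ih =>
    intro b r hr
    have hr' : r * 10 % Y < Y := Nat.mod_lt _ hY
    have hmm : r * 10 % Y * 10 ^ a % Y = r * 10 ^ (a + 1) % Y := by
      have h1 : r * 10 ^ (a + 1) = r * 10 * 10 ^ a := by ring
      rw [h1, Nat.mod_mul_mod]
    have hshape : a + 1 + b = (a + b) + 1 := by omega
    rw [hshape]
    calc pvDstep Y r ((a + b) + 1)
        = Nat.digitChar (r * 10 / Y) :: pvDstep Y (r * 10 % Y) (a + b) := rfl
      _ = Nat.digitChar (r * 10 / Y) ::
          (pvDstep Y (r * 10 % Y) a ++ pvDstep Y (r * 10 % Y * 10 ^ a % Y) b) := by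
          rw [ih b _ hr']
      _ = pvDstep Y r (a + 1) ++ pvDstep Y (r * 10 ^ (a + 1) % Y) b := by
          rw [hmm]; rfl

lemma pv_dstep_length {Y : Nat} : ∀ (k r : Nat), (pvDstep Y r k).length = k := by
  intro k
  induction k with
  | zero => intro r; rfl
  | succ k ih => intro r; simp [pvDstep, ih]

lemma pv_toStr_digit {d : Nat} (hd : d < 10) :
    PySem.Int.toStr (d : Int) = String.ofList [Nat.digitChar d] := by
  apply String.toList_inj.mp
  rw [PySem.Int.toList_toStr, String.toList_ofList]
  have h0 : PySem.Int.toChars (d : Int) = Nat.toDigits 10 d := by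
    simp [PySem.Int.toChars]
  rw [h0, pv_toDigits_single hd]

lemma pv_loopA {Y : Nat} (hY : 0 < Y) : ∀ (l : List Int) (r : Nat) (acc : List String), r < Y →
    (l.foldl
      (fun (st : Int × List String) (_ : Int) =>
        (PySem.Int.mod (st.1 * 10) ((Y : Nat) : Int),
         st.2 ++ [PySem.Int.toStr (PySem.Int.floordiv (st.1 * 10) ((Y : Nat) : Int))]))
      (((r : Nat) : Int), acc)).2
    = acc ++ (pvDstep Y r l.length).map (fun c => String.ofList [c]) := by
  intro l
  induction l with
  | nil => intro r acc hr; simp [pvDstep]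
  | cons a l ih =>
    intro r acc hr
    have hc : ((r : Nat) : Int) * 10 = ((r * 10 : Nat) : Int) := by push_cast; ring
    have hb : r * 10 / Y < 10 := by
      rw [Nat.div_lt_iff_lt_mul hY]; omega
    simp only [List.foldl_cons, hc, PySem.Int.mod_natCast, PySem.Int.floordiv_natCast]
    rw [pv_toStr_digit hb, ih (r * 10 % Y) _ (Nat.mod_lt _ hY)]
    simp [pvDstep]

lemma pv_join_flat : ∀ (ls : List (List Char)), PySem.Chars.join [] ls = ls.flatten := by
  intro ls
  induction ls with
  | nil => rfl
  | cons a ls ih =>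
    cases ls with
    | nil => simp [PySem.Chars.join_singleton]
    | cons b tl =>
      rw [PySem.Chars.join_cons_cons, List.flatten_cons, ← ih]
      simp

lemma pv_join_toList (ls : List String) :
    (PySem.Str.join "" ls).toList = (ls.map String.toList).flatten := by
  rw [PySem.Str.toList_join]
  have h0 : ("" : String).toList = [] := rfl
  rw [h0, pv_join_flat]

lemma pv_joinA (cs : List Char) :
    (PySem.Str.join "" (cs.map (fun c => String.ofList [c]))).toList = cs := by
  rw [PySem.Str.toList_join]
  simp only [List.map_map]
  have : (String.toList ∘ fun c => String.ofList [c]) = fun c => [c] := by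
    funext c; simp
  rw [this]
  have h0 : ("" : String).toList = [] := rfl
  rw [h0]
  exact PySem.Chars.join_nil_singletons cs

lemma pv_toChars_natCast (N : Nat) :
    PySem.Int.toChars ((N : Nat) : Int) = Nat.toDigits 10 N := by
  simp [PySem.Int.toChars]

/-- the `str(10**M + v)[1:]` zero-padding trick, at the character level -/
lemma pv_chunk_chars {M v : Nat} (h : v < 10 ^ M) :
    (PySem.Str.slice (PySem.Int.toStr (((10 ^ M + v : Nat) : Int))) (some 1) none).toList
      = pvRep M v := by
  rw [PySem.Str.toList_slice, PySem.Chars.slice_eq_listSlice, PySem.List.slice_from_one,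
    PySem.Int.toList_toStr]
  rw [pv_toChars_natCast, pv_toDigits_pow_add M v h]
  rfl

lemma pv_frac_bound {Y : Nat} (hY : 0 < Y) {r : Nat} (hr : r < Y) (M : Nat) :
    r * 10 ^ M / Y < 10 ^ M := by
  rw [Nat.div_lt_iff_lt_mul hY]
  have hp : 0 < 10 ^ M := Nat.pow_pos (by norm_num)
  calc r * 10 ^ M < Y * 10 ^ M := by
        exact Nat.mul_lt_mul_of_lt_of_le hr (le_refl _) hp
    _ = 10 ^ M * Y := by ring

/-- Characterisation of B's loop + final block: the concatenated block characters are
    exactly the first `m.toNat` fractional digits of `r/Y`. -/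
lemma pv_fracB {Y : Nat} (hY : 0 < Y) : ∀ (M : Nat) (m : Int), m.toNat = M →
    ∀ (r : Nat) (out : List String), r < Y →
    ((pvFinishB ((Y : Nat) : Int)
        (pvWhileB ((Y : Nat) : Int) ((r : Nat) : Int) out m)).map String.toList).flatten
      = (out.map String.toList).flatten ++ pvDstep Y r m.toNat := by
  intro M
  induction M using Nat.strong_induction_on with
  | _ M ih =>
    intro m hM r out hr
    by_cases h9 : 9 ≤ m
    · rw [pvWhileB, if_pos h9]
      have hc : ((r : Nat) : Int) * 1000000000 = ((r * 1000000000 : Nat) : Int) := by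
        push_cast; ring
      rw [hc, PySem.Int.mod_natCast, PySem.Int.floordiv_natCast]
      have hr' : r * 1000000000 % Y < Y := Nat.mod_lt _ hY
      have hlt : (m - 9).toNat < M := by omega
      rw [ih (m - 9).toNat hlt (m - 9) rfl (r * 1000000000 % Y) _ hr']
      have hE : (1000000000 : Nat) = 10 ^ 9 := by norm_num
      have hcast : (1000000000 : Int) + ((r * 1000000000 / Y : Nat) : Int)
          = ((10 ^ 9 + r * 10 ^ 9 / Y : Nat) : Int) := by
        rw [← hE]; push_cast; ring
      rw [hcast]
      simp only [List.map_append, List.map_cons, List.flatten_append, List.flatten_cons]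
      rw [pv_chunk_chars (pv_frac_bound hY hr 9)]
      rw [pv_rep_eq_dstep hY 9 r hr]
      have hsplit : pvDstep Y r m.toNat
          = pvDstep Y r 9 ++ pvDstep Y (r * 10 ^ 9 % Y) (m.toNat - 9) := by
        rw [show m.toNat = 9 + (m.toNat - 9) by omega, pv_dstep_split hY 9 _ r hr]
        rw [show 9 + (m.toNat - 9) - 9 = m.toNat - 9 by omega]
      rw [show (m - 9).toNat = m.toNat - 9 by omega,
        show (1000000000 : Nat) = 10 ^ 9 by norm_num, hsplit]
      simp [List.append_assoc]
    · rw [pvWhileB, if_neg h9]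
      by_cases h0 : 0 < m
      · rw [pvFinishB, if_pos (by exact h0)]
        have hcast : (10 : Int) ^ m.toNat + PySem.Int.floordiv (((r : Nat) : Int) * (10 : Int) ^ m.toNat) ((Y : Nat) : Int)
            = ((10 ^ m.toNat + r * 10 ^ m.toNat / Y : Nat) : Int) := by
          have hc : ((r : Nat) : Int) * (10 : Int) ^ m.toNat = ((r * 10 ^ m.toNat : Nat) : Int) := by
            push_cast; ring
          rw [hc, PySem.Int.floordiv_natCast]
          push_cast; ring
        rw [hcast]
        simp only [List.map_append, List.map_cons, List.map_nil, List.flatten_append,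
          List.flatten_cons, List.flatten_nil]
        rw [pv_chunk_chars (pv_frac_bound hY hr m.toNat), pv_rep_eq_dstep hY m.toNat r hr]
        simp
      · rw [pvFinishB, if_neg (by exact h0)]
        have : m.toNat = 0 := by omega
        rw [this]
        simp [pvDstep]

-- ===== VERDICT (by name: the statement is the Claim_ definition above) =====
theorem findDivision_spec : Claim_equal_findDivision := by
  intro x y n _
  unfold Spec_findDivision
  by_cases hy : y = 0
  · simp [findDivision, findDivision_alt, hy]
  · have hY : 0 < y.natAbs := Int.natAbs_pos.mpr hy
    have hyb : (y == 0) = false := by simp [hy]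
    have hsign : ∀ a b : Bool, Bool.xor a b = (a != b) := by decide
    simp only [findDivision, findDivision_alt, hyb, Bool.false_eq_true, if_false,
      Int.abs_eq_natAbs, hsign]
    rw [PySem.Int.mod_natCast x.natAbs y.natAbs]
    have hrlt : x.natAbs % y.natAbs < y.natAbs := Nat.mod_lt _ hY
    apply String.toList_inj.mp
    -- B side
    rw [pv_join_toList, pv_fracB hY n.toNat n rfl _ _ hrlt]
    -- A side
    rw [pv_loopA hY _ _ _ hrlt]
    have hlen : (PySem.List.pyRange 0 n 1).length = n.toNat := by
      rw [PySem.List.length_pyRange_one]; simp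
    rw [hlen]
    simp only [List.nil_append]
    have hslice : PySem.List.slice
        ((pvDstep y.natAbs (x.natAbs % y.natAbs) n.toNat).map (fun c => String.ofList [c]))
        none (some n)
        = (pvDstep y.natAbs (x.natAbs % y.natAbs) n.toNat).map (fun c => String.ofList [c]) := by
      by_cases hn : 0 ≤ n
      · rw [show n = ((n.toNat : Nat) : Int) by omega, PySem.List.slice_to_natCast]
        apply List.take_of_length_le
        simp [pv_dstep_length]
      · have hz : n.toNat = 0 := by omega
        rw [hz]
        simp [pvDstep, PySem.List.slice]
    rw [hslice]
    simp only [String.toList_append, pv_joinA]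
    simp
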